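-- pv_equiv track=rewrite | github.com/TimAnakin/VoiceRecognitionBA | voice_recognition_testing/SprachverarbeitungTest_test.py | get_word_positions
-- ===== SOURCE A (Python) =====
-- def get_word_positions(sentence: str):
--     words = sentence.lower().split()
--     word_positions = {}
--
--     for index, word in enumerate(words):
--         if word in word_positions:
--             word_positions[word].append(index)
--         else:
--             word_positions[word] = [index]
--
--     return [(word, positions) for word, positions in word_positions.items()]
--
--
--
--
--
--     return
-- ===== SOURCE B (Python) =====
-- def get_word_positions(sentence: str):
--     words = sentence.lower().split()
--     return [(w, [i for i, x in enumerate(words) if x == w])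
--             for w in dict.fromkeys(words)]
-- ===== Notes on version B (the rewrite author's own statement) =====
-- stated objective: alternative
-- what changed: Replaces the single grouping pass that mutates a dict of position lists with an ordered-distinct-words pass (dict.fromkeys) followed by one enumerate-and-filter scan per distinct word.
import Mathlib
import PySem

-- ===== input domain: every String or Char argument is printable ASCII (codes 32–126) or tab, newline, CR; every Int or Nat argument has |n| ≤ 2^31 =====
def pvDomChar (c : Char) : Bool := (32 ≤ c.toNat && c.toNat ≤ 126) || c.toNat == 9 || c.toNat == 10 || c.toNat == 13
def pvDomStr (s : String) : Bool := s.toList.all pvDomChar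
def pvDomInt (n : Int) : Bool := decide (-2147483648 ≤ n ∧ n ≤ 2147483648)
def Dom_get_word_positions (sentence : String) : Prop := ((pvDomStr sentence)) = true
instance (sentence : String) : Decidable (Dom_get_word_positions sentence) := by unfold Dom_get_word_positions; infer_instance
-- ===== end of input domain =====

-- B builds the ordered distinct-word list and scans the enumeration once per distinct word,
-- instead of A's single grouping pass over a mutated dict; return values are proved equal.
-- ===== PORT A =====
def get_word_positions (sentence : String) : List (String × List Int) :=
  let words := PySem.Str.split₀ (PySem.Str.lower sentence)
  let word_positions :=
    (PySem.List.enumerate words 0).foldl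
      (fun d p =>
        if d.contains p.2 then d.modify p.2 [] (fun l => l ++ [p.1])
        else d.insert p.2 [p.1])
      (PySem.Dict.empty : PySem.Dict String (List Int))
  word_positions.items

-- ===== PORT B =====
def get_word_positions_alt (sentence : String) : List (String × List Int) :=
  let words := PySem.Str.split₀ (PySem.Str.lower sentence)
  (PySem.List.dedup words).map
    (fun w => (w, ((PySem.List.enumerate words 0).filter (fun p => p.2 == w)).map (·.1)))

-- ===== PRECONDITION & SPEC =====
def Spec_get_word_positions (sentence : String) (out : List (String × List Int)) : Prop := out = get_word_positions_alt sentence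
instance (sentence : String) (out : List (String × List Int)) : Decidable (Spec_get_word_positions sentence out) := by unfold Spec_get_word_positions; infer_instance

-- ===== CLAIM (what is proved, stated in full; the proofs are below) =====
def Claim_equal_get_word_positions : Prop := ∀ (sentence : String), Dom_get_word_positions sentence → Spec_get_word_positions sentence (get_word_positions sentence)

-- ===== LEMMAS AND PROOFS =====

-- ===== VERDICT (by name: the statement is the Claim_ definition above) =====
-- A's branched step is exactly Dict.modify with default [].
theorem stepA_eq_modify (d : PySem.Dict String (List Int)) (p : Int × String) :
    (if d.contains p.2 then d.modify p.2 [] (fun l => l ++ [p.1])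
     else d.insert p.2 [p.1]) = d.modify p.2 [] (fun l => l ++ [p.1]) := by
  by_cases h : d.contains p.2 = true
  · simp [h]
  · simp at h
    simp [h, PySem.Dict.modify, PySem.Dict.getD_of_not_contains d [] h]

theorem get_word_positions_spec : Claim_equal_get_word_positions := by
  intro sentence _
  unfold Spec_get_word_positions get_word_positions get_word_positions_alt
  set words := PySem.Str.split₀ (PySem.Str.lower sentence) with hw
  simp only [stepA_eq_modify]
  -- rewrite A's fold over (index, word) pairs as the standard grouping fold over (word, index) pairs
  have hfold :
      (PySem.List.enumerate words 0).foldl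
          (fun d p => d.modify p.2 [] (fun l => l ++ [p.1]))
          (PySem.Dict.empty : PySem.Dict String (List Int))
        = ((PySem.List.enumerate words 0).map (fun p => (p.2, p.1))).foldl
          (fun d q => d.modify q.1 [] (fun l => l ++ [q.2]))
          (PySem.Dict.empty : PySem.Dict String (List Int)) := by
    rw [List.foldl_map]
  rw [hfold]
  set l := (PySem.List.enumerate words 0).map (fun p => (p.2, p.1)) with hl
  set D := l.foldl (fun d q => d.modify q.1 [] (fun ll => ll ++ [q.2]))
      (PySem.Dict.empty : PySem.Dict String (List Int)) with hD
  have hkeysmap : l.map (·.1) = words := by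
    rw [hl]; simp [List.map_map, Function.comp_def, PySem.List.map_snd_enumerate]
  have hkeys : D.keys = PySem.List.dedup words := by
    rw [hD]
    rw [PySem.Dict.keys_foldl_modify_key l Prod.fst [] (fun _ q => fun ll => ll ++ [q.2])]
    rw [hkeysmap]
    simp [PySem.Set.update, PySem.Set.ofList_eq_foldl, PySem.Dict.keys_empty]
  have hnd : D.keys.Nodup := by
    rw [hD]
    exact PySem.Dict.nodup_keys_foldl_modify_key l Prod.fst []
      (fun _ q => fun ll => ll ++ [q.2]) _ PySem.Dict.nodup_keys_empty
  rw [PySem.Dict.items_eq_map_keys D hnd [], hkeys]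
  apply List.map_congr_left
  intro w _
  have hg : D.getD w [] = (l.filter (fun q => q.1 == w)).map (·.2) := by
    rw [hD, PySem.Dict.getD_foldl_modify_append]
    simp [PySem.Dict.getD_empty]
  rw [hg, hl]
  simp [List.filter_map, List.map_map, Function.comp_def]
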